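-- pv_equiv track=rewrite | github.com/dkrajzew/degrotesque | degrotesque.py | _get_tag_name
-- ===== SOURCE A (Python) =====
-- def _get_tag_name(html):
--     """Returns the name of the tag that starts at the begin of the given string.
--
--     Args:
--         html (str): The HTML-subpart
--
--     Returns:
--         (str): The name of the tag
--     """
--     i = 0
--     while i<len(html) and (ord(html[i])<=32 or html[i]=="/"):
--         i = i + 1
--     ib = i
--     ie = i
--     while ie<len(html) and html[ie] not in " \n\r\t>/":
--         ie += 1
--     return html[ib:ie]
-- ===== SOURCE B (Python) =====
-- def _get_tag_name(html):
--     # Single fused pass: a state-machine loop that skips the leading phase,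
--     # collects name characters into an accumulator, and breaks at a delimiter.
--     acc = []
--     started = False
--     for c in html:
--         if not started and (ord(c) <= 32 or c == "/"):
--             continue
--         if c in " \n\r\t>/":
--             break
--         acc.append(c)
--         started = True
--     return "".join(acc)
-- ===== Notes on version B (the rewrite author's own statement) =====
-- stated objective: alternative
-- what changed: Replaces A's two staged index-walking while-loops plus a slice by one fused for-loop state machine: a single pass directly over the characters with a started-flag that skips the leading phase, appends name characters to an accumulator, and breaks at the first delimiter, returning the joined accumulator.
import Mathlib
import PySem

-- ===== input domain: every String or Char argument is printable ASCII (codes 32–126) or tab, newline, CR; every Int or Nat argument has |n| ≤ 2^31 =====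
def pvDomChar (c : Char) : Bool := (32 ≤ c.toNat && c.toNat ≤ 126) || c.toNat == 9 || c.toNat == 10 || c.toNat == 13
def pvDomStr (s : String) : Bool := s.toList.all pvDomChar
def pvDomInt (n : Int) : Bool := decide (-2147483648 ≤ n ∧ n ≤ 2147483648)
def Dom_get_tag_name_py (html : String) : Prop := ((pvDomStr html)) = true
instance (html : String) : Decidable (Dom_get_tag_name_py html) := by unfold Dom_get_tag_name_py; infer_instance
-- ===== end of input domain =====

-- B replaces A's two staged index-walking loops and slice by one fused single-pass
-- state machine with an accumulator and a started-flag (objective: alternative).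

-- ===== PORT A =====
-- while i<len(html) and (ord(html[i])<=32 or html[i]=="/"): i = i + 1
def atn_loop1 (s : List Char) (i : Nat) : Nat :=
  if h : i < s.length then
    if (s[i]'h).toNat ≤ 32 ∨ (s[i]'h) = '/' then atn_loop1 s (i+1) else i
  else i
termination_by s.length - i

-- while ie<len(html) and html[ie] not in " \n\r\t>/": ie += 1
def atn_loop2 (s : List Char) (ie : Nat) : Nat :=
  if h : ie < s.length then
    if (s[ie]'h) ∈ [' ', '\n', '\r', '\t', '>', '/'] then ie
    else atn_loop2 s (ie+1)
  else ie
termination_by s.length - ie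

def get_tag_name_py (html : String) : String :=
  let s := html.toList
  let ib := atn_loop1 s 0
  let ie := atn_loop2 s ib
  String.ofList (PySem.List.slice s (some (ib : Int)) (some (ie : Int)))

-- ===== PORT B =====
-- " \n\r\t>/"
def pvStop : List Char := [' ', '\n', '\r', '\t', '>', '/']

-- the for-loop with continue/break: structural recursion over the characters,
-- state = (acc, started); `break` returns acc
def btn_loop (s : List Char) (acc : List Char) (started : Bool) : List Char :=
  match s with
  | [] => acc
  | c :: rest =>
    if !started && (c.toNat ≤ 32 || c = '/') then btn_loop rest acc started
    else if c ∈ pvStop then acc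
    else btn_loop rest (acc ++ [c]) true

def get_tag_name_py_alt (html : String) : String :=
  String.ofList (btn_loop html.toList [] false)

-- ===== PRECONDITION & SPEC =====
def Spec_get_tag_name_py (html : String) (out : String) : Prop := out = get_tag_name_py_alt html
instance (html : String) (out : String) : Decidable (Spec_get_tag_name_py html out) := by unfold Spec_get_tag_name_py; infer_instance

-- ===== CLAIM (what is proved, stated in full; the proofs are below) =====
def Claim_equal_get_tag_name_py : Prop := ∀ (html : String), Dom_get_tag_name_py html → Spec_get_tag_name_py html (get_tag_name_py html)

-- ===== LEMMAS AND PROOFS =====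

def pvSkipP (c : Char) : Bool := decide (c.toNat ≤ 32 ∨ c = '/')
def pvStopP (c : Char) : Bool := decide (c ∈ pvStop)

lemma loop1_eq (s : List Char) (i : Nat) :
    atn_loop1 s i = i + ((s.drop i).takeWhile pvSkipP).length := by
  fun_induction atn_loop1 s i with
  | case1 i h hc ih =>
    rw [List.drop_eq_getElem_cons h, List.takeWhile_cons_of_pos (by simpa [pvSkipP] using hc)]
    simp at ih ⊢; omega
  | case2 i h hc =>
    rw [List.drop_eq_getElem_cons h, List.takeWhile_cons_of_neg (by simpa [pvSkipP] using hc)]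
    simp
  | case3 i h =>
    rw [List.drop_eq_nil_of_le (by omega)]
    simp

lemma loop2_eq (s : List Char) (i : Nat) :
    atn_loop2 s i = i + ((s.drop i).takeWhile (fun c => !pvStopP c)).length := by
  fun_induction atn_loop2 s i with
  | case1 i h hc =>
    rw [List.drop_eq_getElem_cons h, List.takeWhile_cons_of_neg (by simp [pvStopP, pvStop] at hc ⊢; tauto)]
    simp
  | case2 i h hc ih =>
    rw [List.drop_eq_getElem_cons h, List.takeWhile_cons_of_pos (by simp [pvStopP, pvStop] at hc ⊢; tauto)]
    simp at ih ⊢; omega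
  | case3 i h =>
    rw [List.drop_eq_nil_of_le (by omega)]
    simp

lemma take_len_takeWhile (t : List Char) (r : Char → Bool) :
    t.take ((t.takeWhile r).length) = t.takeWhile r :=
  ((List.prefix_iff_eq_take).1 (List.takeWhile_prefix r)).symm

lemma dropWhile_eq_drop_len (t : List Char) (r : Char → Bool) :
    t.drop ((t.takeWhile r).length) = t.dropWhile r := by
  induction t with
  | nil => simp
  | cons a t ih => by_cases h : r a <;> simp [h, ih]

-- the collect phase of B's loop appends the takeWhile prefix
lemma btn_loop_true (s acc : List Char) :
    btn_loop s acc true = acc ++ s.takeWhile (fun c => !pvStopP c) := by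
  induction s generalizing acc with
  | nil => simp [btn_loop]
  | cons c rest ih =>
    by_cases h : c ∈ pvStop
    · simp [btn_loop, h, List.takeWhile_cons, pvStopP]
    · simp [btn_loop, h, ih, List.takeWhile_cons, pvStopP]

-- B's whole loop from the skip phase computes takeWhile-after-dropWhile
lemma btn_loop_false (s acc : List Char) :
    btn_loop s acc false = acc ++ (s.dropWhile pvSkipP).takeWhile (fun c => !pvStopP c) := by
  induction s generalizing acc with
  | nil => simp [btn_loop]
  | cons c rest ih =>
    by_cases hsk : pvSkipP c
    · have hsk' : (c.toNat ≤ 32 || c = '/') = true := by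
        simpa [pvSkipP] using hsk
      simp [btn_loop, hsk', List.dropWhile_cons, hsk, ih]
    · have hsk' : (c.toNat ≤ 32 || c = '/') = false := by
        simpa [pvSkipP] using hsk
      by_cases hst : c ∈ pvStop
      · simp [btn_loop, hsk', hst, List.dropWhile_cons, hsk, List.takeWhile_cons, pvStopP]
      · simp [btn_loop, hsk', hst, List.dropWhile_cons, hsk, List.takeWhile_cons, pvStopP,
          btn_loop_true]

-- ===== VERDICT (by name: the statement is the Claim_ definition above) =====
theorem get_tag_name_py_spec : Claim_equal_get_tag_name_py := by
  intro html _
  unfold Spec_get_tag_name_py get_tag_name_py get_tag_name_py_alt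
  show String.ofList (PySem.List.slice html.toList
        (some ((atn_loop1 html.toList 0 : Nat) : Int))
        (some ((atn_loop2 html.toList (atn_loop1 html.toList 0) : Nat) : Int)))
      = String.ofList (btn_loop html.toList [] false)
  have h1 := loop1_eq html.toList 0
  simp only [List.drop_zero, Nat.zero_add] at h1
  rw [btn_loop_false, List.nil_append, loop2_eq, h1, PySem.List.slice_natCast,
    Nat.add_sub_cancel_left, ← dropWhile_eq_drop_len, take_len_takeWhile]
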